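-- pv_equiv track=rewrite | github.com/dhrushit-RIT/CSCI-665 | Homework4/Question2/partitions.py | find_even_partitions
-- ===== SOURCE A (Python) =====
-- def find_even_partitions(arr):
--     """
--     finds the number of even partitions possible in the list of numbers
--     :param arr: input array
--     :return: num even partitions possible
--     """
--     """
--         even-partitions
--         1: 1
--         2: 3
--         3: 4
--         4: 8
--         5: 16 ...
--         """
--
--     cnt_even = 0
--     cnt_odd = 0
--     for i in arr:
--         if i & 1:
--             cnt_odd += 1
--         else:
--             cnt_even += 1
--
--     num_even = 0
--     num_odd = 0
--     for num in arr:
--         if num & 1: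
--             if num_odd == 1:
--                 num_even += 1
--                 num_odd = 0
--             else:
--                 num_odd = 1
--         else:
--             if num_odd == 0:
--                 num_even += 1
--
--     even_partitions = [1, 3, 4]
--     for i in range(2, num_even):
--         even_partitions.append(2 * even_partitions[-1])
--
--     if num_odd & 1:
--         return 0
--     else:
--         return even_partitions[num_even - 1]
-- ===== SOURCE B (Python) =====
-- def find_even_partitions(arr):
--     """
--     finds the number of even partitions possible in the list of numbers
--     :param arr: input array
--     :return: num even partitions possible
--     """
--     num_even = 0
--     num_odd = 0
--     for num in arr:
--         if num & 1:
--             num_even += num_odd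
--             num_odd = 1 - num_odd
--         else:
--             num_even += 1 - num_odd
--     if num_odd:
--         return 0
--     if num_even > 2:
--         return 2 ** (num_even - 1)
--     return [1, 3, 4][num_even - 1]
-- ===== Notes on version B (the rewrite author's own statement) =====
-- stated objective: simpler
-- what changed: B deletes A's unused first counting pass, fuses the odd/even pairing loop into a branch-light arithmetic update, and replaces A's list-building loop plus indexing with the closed form 2**(num_even-1) (indexing the 3-element base list for num_even <= 2, which also yields A's negative-index value 4 on empty input), so no list of num_even growing big integers is ever materialized.
import Mathlib
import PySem

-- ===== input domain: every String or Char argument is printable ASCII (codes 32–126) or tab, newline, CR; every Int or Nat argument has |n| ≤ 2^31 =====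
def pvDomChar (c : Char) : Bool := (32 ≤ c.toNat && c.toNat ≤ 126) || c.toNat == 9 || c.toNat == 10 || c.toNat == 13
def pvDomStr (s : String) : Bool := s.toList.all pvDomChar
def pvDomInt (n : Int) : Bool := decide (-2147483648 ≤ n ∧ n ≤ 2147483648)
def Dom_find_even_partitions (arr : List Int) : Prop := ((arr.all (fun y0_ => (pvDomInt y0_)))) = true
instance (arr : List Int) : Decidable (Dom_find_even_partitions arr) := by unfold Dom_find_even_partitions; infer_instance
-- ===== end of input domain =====

-- B drops A's unused first counting pass and replaces A's list-building loop by a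
-- closed form 2^(num_even-1) (with the 3-element base list indexed as in Python,
-- so the empty-input negative-index value 4 arises naturally); objective: simpler.


-- ===== PORT A =====
-- step of A's second loop (num_even, num_odd)
def pvStepA (p : Int × Int) (num : Int) : Int × Int :=
  if PySem.Int.band num 1 ≠ 0 then
    if p.2 = 1 then (p.1 + 1, 0) else (p.1, 1)
  else
    if p.2 = 0 then (p.1 + 1, p.2) else p

-- step of A's list-building loop: even_partitions.append(2 * even_partitions[-1])
def pvStepEP (l : List Int) (_i : Int) : List Int :=
  l ++ [2 * (PySem.List.pyGet? l (-1)).getD 0]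

def find_even_partitions (arr : List Int) : Int :=
  -- first pass (cnt_even, cnt_odd): computed as in A, never used afterwards
  let _cnt := arr.foldl
    (fun (p : Int × Int) i =>
      if PySem.Int.band i 1 ≠ 0 then (p.1, p.2 + 1) else (p.1 + 1, p.2)) (0, 0)
  let s := arr.foldl pvStepA (0, 0)
  let num_even := s.1
  let num_odd := s.2
  let even_partitions := (PySem.List.pyRange 2 num_even 1).foldl pvStepEP [1, 3, 4]
  if PySem.Int.band num_odd 1 ≠ 0 then 0
  else (PySem.List.pyGet? even_partitions (num_even - 1)).getD 0

-- ===== PORT B =====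
-- step of B's single loop (num_even, num_odd), branch-free arithmetic update
def pvStepB (p : Int × Int) (num : Int) : Int × Int :=
  if PySem.Int.band num 1 ≠ 0 then (p.1 + p.2, 1 - p.2)
  else (p.1 + (1 - p.2), p.2)

def find_even_partitions_alt (arr : List Int) : Int :=
  let p := arr.foldl pvStepB (0, 0)
  if p.2 ≠ 0 then 0
  else if p.1 > 2 then 2 ^ (p.1 - 1).toNat
  else (PySem.List.pyGet? [1, 3, 4] (p.1 - 1)).getD 0

-- ===== PRECONDITION & SPEC =====
def Spec_find_even_partitions (arr : List Int) (out : Int) : Prop := out = find_even_partitions_alt arr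
instance (arr : List Int) (out : Int) : Decidable (Spec_find_even_partitions arr out) := by unfold Spec_find_even_partitions; infer_instance

-- ===== CLAIM (what is proved, stated in full; the proofs are below) =====
def Claim_equal_find_even_partitions : Prop := ∀ (arr : List Int), Dom_find_even_partitions arr → Spec_find_even_partitions arr (find_even_partitions arr)

-- ===== LEMMAS AND PROOFS =====

-- the two loop steps agree, and preserve 0 ≤ num_even ∧ num_odd ∈ {0,1}
lemma pvFold_eq_inv : ∀ (arr : List Int) (e o : Int), 0 ≤ e → (o = 0 ∨ o = 1) →
    arr.foldl pvStepA (e, o) = arr.foldl pvStepB (e, o) ∧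
    0 ≤ (arr.foldl pvStepB (e, o)).1 ∧
    ((arr.foldl pvStepB (e, o)).2 = 0 ∨ (arr.foldl pvStepB (e, o)).2 = 1) := by
  intro arr
  induction arr with
  | nil => intro e o he ho; exact ⟨rfl, he, ho⟩
  | cons x xs ih =>
    intro e o he ho
    have hstep : pvStepA (e, o) x = pvStepB (e, o) x ∧
        0 ≤ (pvStepB (e, o) x).1 ∧ ((pvStepB (e, o) x).2 = 0 ∨ (pvStepB (e, o) x).2 = 1) := by
      rcases ho with h | h <;> subst h <;>
        simp [pvStepA, pvStepB] <;> split_ifs <;> simp <;> omega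
    have := ih (pvStepB (e, o) x).1 (pvStepB (e, o) x).2 hstep.2.1 hstep.2.2
    simpa [List.foldl_cons, hstep.1] using this

-- shape of A's even_partitions list after the building loop
lemma pvEP_shape : ∀ t : Nat,
    (PySem.List.pyRange 2 ((t : Int) + 2) 1).foldl pvStepEP [1, 3, 4] =
      [1, 3] ++ (List.range (t + 1)).map (fun k => (2 : Int) ^ (k + 2)) := by
  intro t
  induction t with
  | zero =>
    rw [PySem.List.pyRange_one_eq_nil (by omega)]
    simp [List.range_succ]
  | succ t ih =>
    have hsplit : PySem.List.pyRange 2 ((t : Int) + 1 + 2) 1 =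
        PySem.List.pyRange 2 ((t : Int) + 2) 1 ++ [(t : Int) + 2] := by
      have := PySem.List.pyRange_one_succ_right (a := 2) (b := (t : Int) + 2) (by omega)
      simpa [add_comm, add_left_comm, add_assoc] using this
    push_cast
    rw [hsplit, List.foldl_append, ih]
    have hlast : PySem.List.pyGet?
        ([1, 3] ++ (List.range (t + 1)).map (fun k => (2 : Int) ^ (k + 2))) (-1) =
        some ((2 : Int) ^ (t + 2)) := by
      rw [List.range_succ, PySem.List.pyGet?_neg_one]
      simp only [List.map_append, List.map_cons, List.map_nil, List.cons_append, List.nil_append]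
      rw [show (1 : Int) :: 3 :: (List.map (fun k => (2 : Int) ^ (k + 2)) (List.range t) ++
            [(2 : Int) ^ (t + 2)]) =
          ((1 : Int) :: 3 :: List.map (fun k => (2 : Int) ^ (k + 2)) (List.range t)) ++
            [(2 : Int) ^ (t + 2)] from rfl, List.getLast?_concat]
    simp only [List.foldl_cons, List.foldl_nil, pvStepEP, hlast, Option.getD_some]
    rw [List.range_succ (n := t + 1)]
    simp [pow_succ]
    ring

-- A's tail (build list, index num_even - 1) equals B's closed form, for num_even = m ≥ 0
lemma pvTail_eq : ∀ m : Nat,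
    (PySem.List.pyGet? ((PySem.List.pyRange 2 (m : Int) 1).foldl pvStepEP [1, 3, 4])
        ((m : Int) - 1)).getD 0 =
      if (m : Int) > 2 then 2 ^ ((m : Int) - 1).toNat
      else (PySem.List.pyGet? [1, 3, 4] ((m : Int) - 1)).getD 0 := by
  intro m
  match m with
  | 0 => decide
  | 1 => decide
  | 2 => decide
  | (t + 3) =>
    have hm : ((t + 3 : Nat) : Int) = ((t + 1 : Nat) : Int) + 2 := by push_cast; ring
    rw [hm, pvEP_shape (t + 1)]
    have hidx : ((t + 1 : Nat) : Int) + 2 - 1 = ((t + 2 : Nat) : Int) := by push_cast; ring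
    rw [hidx, PySem.List.pyGet?_natCast]
    have hgt : ((t + 1 : Nat) : Int) + 2 > 2 := by omega
    rw [if_pos hgt]
    have : ([1, 3] ++ (List.range (t + 1 + 1)).map (fun k => (2 : Int) ^ (k + 2)))[(t + 2 : Nat)]? =
        some ((2 : Int) ^ (t + 2)) := by
      rw [List.getElem?_append_right (by simp)]
      simp
    rw [this]
    have h2 : (((t : Int)) + 2).toNat = t + 2 := by omega
    simp [h2]

-- ===== VERDICT (by name: the statement is the Claim_ definition above) =====
theorem find_even_partitions_spec : Claim_equal_find_even_partitions := by
  unfold Claim_equal_find_even_partitions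
  intro arr _
  unfold Spec_find_even_partitions find_even_partitions find_even_partitions_alt
  obtain ⟨heq, hnn, ho⟩ := pvFold_eq_inv arr 0 0 le_rfl (Or.inl rfl)
  simp only [heq]
  rcases hE : arr.foldl pvStepB (0, 0) with ⟨e, o⟩
  rw [hE] at hnn ho
  simp only at hnn ho
  rcases ho with h | h <;> subst h
  · -- num_odd = 0: neither returns 0; compare the tails
    obtain ⟨m, hm⟩ := Int.eq_ofNat_of_zero_le hnn
    subst hm
    simpa using pvTail_eq m
  · -- num_odd = 1: both return 0
    simp
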